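-- pv_equiv track=rewrite | github.com/walley78/baekjoon_algorithm | 프로그래머스/2/131127. 할인 행사/할인 행사.py | solution
-- ===== SOURCE A (Python) =====
-- from copy import deepcopy
--
-- def solution(want, number, discount):
--     wantdic = dict()
--     for i in range(len(want)):
--         wantdic[want[i]] = number[i]
--
--     def tendays(dic, discount):
--         tempdic = deepcopy(dic)
--         for i in range(10):
--             if tempdic.get(discount[i]) and tempdic[discount[i]] > 0:
--                 tempdic[discount[i]] -= 1
--             else:
--                 return False
--         else:
--             return True
--
--     daycount = 0
--     for i in range(len(discount)-10+1):
--         if tendays(wantdic, discount[i:i+10]):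
--             daycount += 1
--
--     return daycount
-- ===== SOURCE B (Python) =====
-- def solution(want, number, discount):
--     wantd = {want[i]: number[i] for i in range(len(want))}
--     n = len(discount)
--     if n < 10:
--         return 0
--     cnt = {}
--     bad = 0  # number of distinct items in the window whose count exceeds its quota
--
--     def add(x):
--         nonlocal bad
--         q = wantd.get(x, 0)
--         c0 = cnt.get(x, 0)
--         c = c0 + 1
--         cnt[x] = c
--         if c > q and not (c0 > 0 and c0 > q):
--             bad += 1
--
--     def remove(x):
--         nonlocal bad
--         q = wantd.get(x, 0)
--         c = cnt.get(x, 0) - 1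
--         cnt[x] = c
--         if c + 1 > q and not (c > 0 and c > q):
--             bad -= 1
--
--     for j in range(10):
--         add(discount[j])
--     answer = 1 if bad == 0 else 0
--     for i in range(1, n - 9):
--         remove(discount[i - 1])
--         add(discount[i + 9])
--         if bad == 0:
--             answer += 1
--     return answer
-- ===== Notes on version B (the rewrite author's own statement) =====
-- stated objective: alternative
-- what changed: A rebuilds per-window state from scratch (deepcopy of the want-dict, then a decrement-with-early-return pass over the 10 items) for every start day; B fills one counter for the first window and then slides it, doing one remove and one add per shifted day while maintaining a running tally of over-quota items, so each window check is the O(1) test bad == 0.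
import Mathlib
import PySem

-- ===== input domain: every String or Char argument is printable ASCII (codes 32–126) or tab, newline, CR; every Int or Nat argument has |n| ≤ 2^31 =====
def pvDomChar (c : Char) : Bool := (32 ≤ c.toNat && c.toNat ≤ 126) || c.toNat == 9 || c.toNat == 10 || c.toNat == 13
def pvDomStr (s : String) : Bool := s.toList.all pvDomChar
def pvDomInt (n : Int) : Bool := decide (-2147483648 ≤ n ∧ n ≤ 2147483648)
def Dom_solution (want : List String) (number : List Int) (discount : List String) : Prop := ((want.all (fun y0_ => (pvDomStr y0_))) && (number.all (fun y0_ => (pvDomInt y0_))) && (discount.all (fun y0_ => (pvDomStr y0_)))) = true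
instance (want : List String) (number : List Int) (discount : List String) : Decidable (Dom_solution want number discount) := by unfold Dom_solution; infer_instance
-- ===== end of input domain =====

-- B replaces A's per-window dict deepcopy + decrement-with-early-return by an
-- incrementally maintained sliding-window counter with a running "bad items" tally:
-- one remove and one add per shifted day instead of rebuilding each window's state.


-- ===== PORT A =====
-- A's inner helper `tendays`: for i in range(10), decrement tempdic[discount[i]] if
-- truthy and > 0, else return False; True after the loop.  `none` from pyGet? would be
-- Python's IndexError — unreachable from `solution`, whose slices have length 10.
def tendaysGo (tempdic : PySem.Dict String Int) (disc : List String) (i : Nat) : Bool :=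
  if _h : i < 10 then
    match PySem.List.pyGet? disc (i : Int) with
    | none => false
    | some x =>
      match tempdic.get? x with
      | none => false
      | some v => if v ≠ 0 ∧ 0 < v then tendaysGo (tempdic.insert x (v - 1)) disc (i + 1) else false
  else true
termination_by 10 - i

def solution (want : List String) (number : List Int) (discount : List String) : Int :=
  -- wantdic[want[i]] = number[i]; the `none` arm is Python's IndexError on number[i],
  -- excluded by Pre_solution (want.length ≤ number.length)
  let wantdic : PySem.Dict String Int :=
    (List.range want.length).foldl (fun d (i : Nat) =>
      match PySem.List.pyGet? want (i : Int), PySem.List.pyGet? number (i : Int) with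
      | some k, some v => d.insert k v
      | _, _ => d) PySem.Dict.empty
  (PySem.List.pyRange 0 ((discount.length : Int) - 10 + 1) 1).foldl (fun daycount i =>
    if tendaysGo wantdic (PySem.List.slice discount (some i) (some (i + 10))) 0
    then daycount + 1 else daycount) 0

-- ===== PORT B =====
-- B's `add(x)`: bump the window count of x and grow `bad` when x just exceeded its quota.
def bAdd (wantd cnt : PySem.Dict String Int) (bad : Int) (x : String) :
    PySem.Dict String Int × Int :=
  let q := wantd.getD x 0
  let c0 := cnt.getD x 0
  let c := c0 + 1
  (cnt.insert x c, if c > q ∧ ¬(c0 > 0 ∧ c0 > q) then bad + 1 else bad)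

-- B's `remove(x)`: drop the window count of x and shrink `bad` when x just fell within quota.
def bRemove (wantd cnt : PySem.Dict String Int) (bad : Int) (x : String) :
    PySem.Dict String Int × Int :=
  let q := wantd.getD x 0
  let c := cnt.getD x 0 - 1
  (cnt.insert x c, if c + 1 > q ∧ ¬(c > 0 ∧ c > q) then bad - 1 else bad)

def solution_alt (want : List String) (number : List Int) (discount : List String) : Int :=
  -- wantd = {want[i]: number[i] for i in range(len(want))}; `none` = IndexError on
  -- number[i], excluded by Pre_solution
  let wantd : PySem.Dict String Int :=
    (List.range want.length).foldl (fun d (i : Nat) =>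
      match PySem.List.pyGet? want (i : Int) with
      | none => d
      | some k =>
        match PySem.List.pyGet? number (i : Int) with
        | none => d
        | some v => d.insert k v) PySem.Dict.empty
  if discount.length < 10 then 0
  else
    -- fill the first window; discount[j] with j < 10 ≤ len(discount) never raises,
    -- so the `.getD ""` default is unreachable
    let st0 := (List.range 10).foldl
      (fun st (j : Nat) => bAdd wantd st.1 st.2 ((PySem.List.pyGet? discount (j : Int)).getD ""))
      (PySem.Dict.empty, 0)
    -- slide: for i in range(1, n-9): remove(discount[i-1]); add(discount[i+9])
    let res := (PySem.List.pyRange 1 ((discount.length : Int) - 9) 1).foldl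
      (fun (s : (PySem.Dict String Int × Int) × Int) i =>
        let st1 := bRemove wantd s.1.1 s.1.2 ((PySem.List.pyGet? discount (i - 1)).getD "")
        let st2 := bAdd wantd st1.1 st1.2 ((PySem.List.pyGet? discount (i + 9)).getD "")
        (st2, if st2.2 = 0 then s.2 + 1 else s.2))
      (st0, if st0.2 = 0 then 1 else 0)
    res.2

-- ===== PRECONDITION & SPEC =====
-- Pre_ excludes exactly the inputs where A raises IndexError (number shorter than want).
def Pre_solution (want : List String) (number : List Int) (discount : List String) : Prop :=
  want.length ≤ number.length
instance (want : List String) (number : List Int) (discount : List String) : Decidable (Pre_solution want number discount) := by unfold Pre_solution; infer_instance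

def pvWitness_solution : List String × List Int × List String :=
  (["a"], [2], ["a", "a", "a", "a", "a", "a", "a", "a", "a", "a"])

def Spec_solution (want : List String) (number : List Int) (discount : List String) (out : Int) : Prop := out = solution_alt want number discount
instance (want : List String) (number : List Int) (discount : List String) (out : Int) : Decidable (Spec_solution want number discount out) := by unfold Spec_solution; infer_instance

-- ===== CLAIM (what is proved, stated in full; the proofs are below) =====
def Claim_equal_solution : Prop := ∀ (want : List String) (number : List Int) (discount : List String), Dom_solution want number discount → Pre_solution want number discount → Spec_solution want number discount (solution want number discount)

-- ===== LEMMAS AND PROOFS =====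

-- BC wantd w: number of distinct items of w whose count in w exceeds its quota.
def BC (wantd : PySem.Dict String Int) (w : List String) : Int :=
  ((w.toFinset.filter (fun x => wantd.getD x 0 < (w.count x : Int))).card : Int)

-- Invariant carried by B's sliding state (cnt, bad) for the current window w.
def SInv (wantd cnt : PySem.Dict String Int) (bad : Int) (w : List String) : Prop :=
  (∀ x, cnt.getD x 0 = (w.count x : Int)) ∧ bad = BC wantd w

theorem BC_perm (wantd : PySem.Dict String Int) (w w' : List String) (h : w.Perm w') :
    BC wantd w = BC wantd w' := by
  unfold BC
  rw [List.toFinset_eq_of_perm _ _ h]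
  have he : (w'.toFinset.filter (fun x => wantd.getD x 0 < (w.count x : Int)))
      = w'.toFinset.filter (fun x => wantd.getD x 0 < (w'.count x : Int)) := by
    apply Finset.filter_congr
    intro x _
    rw [h.count_eq]
  rw [he]

theorem cntAppendInt (w : List String) (y x : String) :
    ((w ++ [y]).count x : Int) = (w.count x : Int) + if y = x then 1 else 0 := by
  have h : (w ++ [y]).count x = w.count x + if y = x then 1 else 0 := by
    rw [List.count_append]
    simp [List.count_cons]
  rw [h]; split <;> push_cast <;> omega

theorem BC_append (wantd : PySem.Dict String Int) (w : List String) (y : String) :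
    BC wantd (w ++ [y]) = BC wantd w +
      (if wantd.getD y 0 < (w.count y : Int) + 1 ∧
          ¬((0:Int) < (w.count y : Int) ∧ wantd.getD y 0 < (w.count y : Int)) then 1 else 0) := by
  have hcnt : ∀ x : String, ((w ++ [y]).count x : Int) =
      (w.count x : Int) + if y = x then 1 else 0 := cntAppendInt w y
  unfold BC
  rw [List.toFinset_append]
  simp only [List.toFinset_cons, List.toFinset_nil, insert_empty_eq,
    Finset.union_singleton]
  rw [Finset.card_filter, Finset.card_filter]
  by_cases hy : y ∈ w.toFinset
  · rw [Finset.insert_eq_self.mpr hy]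
    rw [← Finset.add_sum_erase _ _ hy, ← Finset.add_sum_erase _ _ hy]
    have hrest : ∑ x ∈ w.toFinset.erase y, (if wantd.getD x 0 < ((w ++ [y]).count x : Int) then (1:Nat) else 0)
        = ∑ x ∈ w.toFinset.erase y, (if wantd.getD x 0 < (w.count x : Int) then (1:Nat) else 0) := by
      apply Finset.sum_congr rfl
      intro x hx
      have hne : y ≠ x := fun he => (Finset.mem_erase.mp hx).1 he.symm
      rw [hcnt x, if_neg hne, add_zero]
    rw [hrest]
    have hc0 : 0 < (w.count y : Int) := by
      have := List.count_pos_iff.mpr (List.mem_toFinset.mp hy)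
      exact_mod_cast this
    rw [hcnt y, if_pos rfl]
    push_cast
    split_ifs <;> omega
  · rw [Finset.sum_insert hy]
    have hrest : ∑ x ∈ w.toFinset, (if wantd.getD x 0 < ((w ++ [y]).count x : Int) then (1:Nat) else 0)
        = ∑ x ∈ w.toFinset, (if wantd.getD x 0 < (w.count x : Int) then (1:Nat) else 0) := by
      apply Finset.sum_congr rfl
      intro x hx
      have hne : y ≠ x := fun he => hy (he ▸ hx)
      rw [hcnt x, if_neg hne, add_zero]
    rw [hrest]
    have hc0 : (w.count y : Int) = 0 := by
      have := List.count_eq_zero_of_not_mem (fun hm => hy (List.mem_toFinset.mpr hm))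
      exact_mod_cast congrArg (Nat.cast : Nat → Int) this
    rw [hcnt y, if_pos rfl]
    push_cast
    split_ifs <;> omega

theorem SInv_add (wantd cnt : PySem.Dict String Int) (bad : Int) (w : List String) (y : String)
    (h : SInv wantd cnt bad w) :
    SInv wantd (bAdd wantd cnt bad y).1 (bAdd wantd cnt bad y).2 (w ++ [y]) := by
  obtain ⟨hc, hb⟩ := h
  unfold bAdd
  constructor
  · intro x
    rw [cntAppendInt w y x, PySem.Dict.getD_insert]
    by_cases hxy : x = y
    · subst hxy
      rw [if_pos rfl, if_pos rfl, hc x]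
    · rw [if_neg hxy, if_neg (fun h => hxy h.symm), hc x, add_zero]
  · simp only []
    rw [BC_append, ← hb, hc y]
    simp only [gt_iff_lt]
    split_ifs <;> omega

theorem SInv_remove (wantd cnt : PySem.Dict String Int) (bad : Int) (w : List String) (y : String)
    (h : SInv wantd cnt bad w) (hy : y ∈ w) :
    SInv wantd (bRemove wantd cnt bad y).1 (bRemove wantd cnt bad y).2 (w.erase y) := by
  obtain ⟨hc, hb⟩ := h
  have hpos : 1 ≤ w.count y := List.count_pos_iff.mpr hy
  have hcy : ((w.erase y).count y : Int) = (w.count y : Int) - 1 := by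
    rw [List.count_erase_self]; push_cast [hpos]; omega
  unfold bRemove
  constructor
  · intro x
    rw [PySem.Dict.getD_insert]
    by_cases hxy : x = y
    · subst hxy; rw [if_pos rfl, hc x, hcy]
    · rw [if_neg hxy, hc x, List.count_erase_of_ne hxy]
  · simp only []
    have hperm : w.Perm (w.erase y ++ [y]) :=
      (List.perm_cons_erase hy).trans (List.perm_append_singleton y (w.erase y)).symm
    have hBC : BC wantd w = BC wantd (w.erase y) +
        (if wantd.getD y 0 < ((w.erase y).count y : Int) + 1 ∧
            ¬((0:Int) < ((w.erase y).count y : Int) ∧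
              wantd.getD y 0 < ((w.erase y).count y : Int)) then 1 else 0) := by
      rw [BC_perm wantd w _ hperm, BC_append]
    rw [hb, hBC, hc y, ← hcy]
    simp only [gt_iff_lt]
    split_ifs <;> omega

theorem BC_zero_iff (wantd : PySem.Dict String Int) (w : List String) :
    BC wantd w = 0 ↔ ∀ x ∈ w, (w.count x : Int) ≤ wantd.getD x 0 := by
  unfold BC
  rw [Int.ofNat_eq_zero, Finset.card_eq_zero, Finset.filter_eq_empty_iff]
  constructor
  · intro h x hx
    have := h (List.mem_toFinset.mpr hx)
    omega
  · intro h x hx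
    have := h x (List.mem_toFinset.mp hx)
    omega

-- A's decrement loop, recast structurally over the window list (proof device only).
def tdList : PySem.Dict String Int → List String → Bool
  | _, [] => true
  | d, x :: t =>
    match d.get? x with
    | none => false
    | some v => if v ≠ 0 ∧ 0 < v then tdList (d.insert x (v - 1)) t else false

theorem tendaysGo_eq_tdList (k : Nat) : ∀ (i : Nat) (d : PySem.Dict String Int) (w : List String),
    i + k = 10 → w.length = 10 → tendaysGo d w i = tdList d (w.drop i) := by
  induction k with
  | zero =>
    intro i d w hik hw
    have h10 : i = 10 := by omega
    subst h10
    rw [tendaysGo]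
    have hd : List.drop 10 w = [] := List.drop_eq_nil_of_le (by omega)
    simp [hd, tdList]
  | succ k ih =>
    intro i d w hik hw
    have hi : i < 10 := by omega
    have hiw : i < w.length := by omega
    rw [tendaysGo, List.drop_eq_getElem_cons hiw]
    simp only [hi, dite_true, PySem.List.pyGet?_natCast, List.getElem?_eq_getElem hiw]
    cases hg : d.get? w[i] with
    | none => simp [tdList, hg]
    | some v =>
      simp only [tdList, hg]
      by_cases hv : v ≠ 0 ∧ 0 < v
      · simp only [if_pos hv]
        exact ih (i + 1) (d.insert w[i] (v - 1)) w (by omega) hw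
      · simp [if_neg hv]

theorem tdList_eq_true_iff (w : List String) : ∀ (d : PySem.Dict String Int),
    tdList d w = true ↔ ∀ x ∈ w, (w.count x : Int) ≤ d.getD x 0 := by
  induction w with
  | nil => intro d; simp [tdList]
  | cons x t ih =>
    intro d
    cases hg : d.get? x with
    | none =>
      have hd0 : d.getD x 0 = 0 := PySem.Dict.getD_of_get?_eq_none _ _ hg
      simp only [tdList, hg]
      constructor
      · intro h; exact absurd h (by simp)
      · intro h
        have := h x (List.mem_cons_self)
        rw [hd0, List.count_cons_self] at this
        omega
    | some v =>
      have hdv : d.getD x 0 = v := PySem.Dict.getD_of_get?_eq_some _ _ hg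
      simp only [tdList, hg]
      by_cases hv : v ≠ 0 ∧ 0 < v
      · rw [if_pos hv, ih]
        constructor
        · intro h y hy
          rcases List.mem_cons.mp hy with rfl | hyt
          · rw [hdv, List.count_cons_self]
            by_cases hxT : y ∈ t
            · have := h y hxT
              rw [PySem.Dict.getD_insert] at this
              simp at this
              omega
            · rw [List.count_eq_zero_of_not_mem hxT]; omega
          · by_cases hyx : y = x
            · subst hyx
              have := h y hyt
              rw [PySem.Dict.getD_insert] at this
              simp at this
              rw [hdv, List.count_cons_self]
              omega
            · have := h y hyt
              rw [PySem.Dict.getD_insert, if_neg hyx] at this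
              rw [List.count_cons_of_ne (Ne.symm hyx)]
              exact this
        · intro h y hy
          rw [PySem.Dict.getD_insert]
          by_cases hyx : y = x
          · subst hyx
            have := h y (List.mem_cons_self)
            rw [hdv, List.count_cons_self] at this
            simp
            omega
          · rw [if_neg hyx]
            have := h y (List.mem_cons_of_mem _ hy)
            rw [List.count_cons_of_ne (Ne.symm hyx)] at this
            exact this
      · rw [if_neg hv]
        constructor
        · intro h; exact absurd h (by simp)
        · intro h
          have := h x (List.mem_cons_self)
          rw [hdv, List.count_cons_self] at this
          omega

-- the 10-day window starting at day j
def win (d : List String) (j : Nat) : List String := (d.drop j).take 10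

theorem win_head (d : List String) (j : Nat) (h : j + 11 ≤ d.length) :
    win d j = d[j]'(by omega) :: (d.drop (j+1)).take 9 := by
  unfold win
  rw [List.drop_eq_getElem_cons (by omega : j < d.length)]
  rfl

theorem win_succ (d : List String) (j : Nat) (h : j + 11 ≤ d.length) :
    win d (j+1) = (d.drop (j+1)).take 9 ++ [d[j+10]'(by omega)] := by
  unfold win
  have h9 : 9 < (d.drop (j+1)).length := by simp; omega
  have h1 : List.take (9+1) (d.drop (j+1)) = List.take 9 (d.drop (j+1)) ++ [(d.drop (j+1))[9]'h9] := by
    rw [List.take_add_one, List.getElem?_eq_getElem h9]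
    rfl
  have h2 : List.take 10 (d.drop (j+1)) = List.take (9+1) (d.drop (j+1)) := rfl
  rw [h2, h1]
  congr 1
  rw [List.getElem_drop]

-- B's first-window fill and slide fold, named for the induction (proof device only)
def bInit (wantd : PySem.Dict String Int) (d : List String) : PySem.Dict String Int × Int :=
  (List.range 10).foldl
    (fun st (j : Nat) => bAdd wantd st.1 st.2 ((PySem.List.pyGet? d (j : Int)).getD ""))
    (PySem.Dict.empty, 0)

def bFold (wantd : PySem.Dict String Int) (d : List String) (k : Nat) :
    (PySem.Dict String Int × Int) × Int :=
  (PySem.List.pyRange 1 ((k : Int) + 1) 1).foldl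
    (fun (s : (PySem.Dict String Int × Int) × Int) i =>
      let st1 := bRemove wantd s.1.1 s.1.2 ((PySem.List.pyGet? d (i - 1)).getD "")
      let st2 := bAdd wantd st1.1 st1.2 ((PySem.List.pyGet? d (i + 9)).getD "")
      (st2, if st2.2 = 0 then s.2 + 1 else s.2))
    (bInit wantd d, if (bInit wantd d).2 = 0 then 1 else 0)

theorem bInit_inv (wantd : PySem.Dict String Int) (d : List String) (hn : 10 ≤ d.length)
    (k : Nat) (hk : k ≤ 10) :
    SInv wantd
      ((List.range k).foldl
        (fun st (j : Nat) => bAdd wantd st.1 st.2 ((PySem.List.pyGet? d (j : Int)).getD ""))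
        (PySem.Dict.empty, 0)).1
      ((List.range k).foldl
        (fun st (j : Nat) => bAdd wantd st.1 st.2 ((PySem.List.pyGet? d (j : Int)).getD ""))
        (PySem.Dict.empty, 0)).2
      (d.take k) := by
  induction k with
  | zero =>
    constructor
    · intro x; simp [PySem.Dict.getD_empty]
    · simp [BC]
  | succ k ih =>
    have hk10 : k ≤ 10 := by omega
    have hklen : k < d.length := by omega
    rw [List.range_succ, List.foldl_append, List.foldl_cons, List.foldl_nil]
    have hel : ((PySem.List.pyGet? d (k : Int)).getD "") = d[k] := by
      rw [PySem.List.pyGet?_natCast, List.getElem?_eq_getElem hklen]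
      rfl
    rw [hel, List.take_add_one, List.getElem?_eq_getElem hklen]
    exact SInv_add wantd _ _ _ _ (ih hk10)

theorem bFold_inv (wantd : PySem.Dict String Int) (d : List String) (k : Nat)
    (hk : k + 10 ≤ d.length) :
    SInv wantd (bFold wantd d k).1.1 (bFold wantd d k).1.2 (win d k) ∧
    (bFold wantd d k).2 =
      ((List.range (k+1)).countP (fun j => decide (BC wantd (win d j) = 0)) : Int) := by
  induction k with
  | zero =>
    have h0 : PySem.List.pyRange 1 ((0 : Int) + 1) 1 = [] :=
      PySem.List.pyRange_one_eq_nil (by omega)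
    have hinv : SInv wantd (bInit wantd d).1 (bInit wantd d).2 (win d 0) := by
      have := bInit_inv wantd d (by omega) 10 le_rfl
      unfold bInit win
      simpa [List.drop_zero] using this
    unfold bFold
    rw [show ((0:Nat) : Int) = (0:Int) from rfl, h0, List.foldl_nil]
    refine ⟨hinv, ?_⟩
    have hbc : (bInit wantd d).2 = BC wantd (win d 0) := hinv.2
    rw [hbc, show List.range 1 = [0] from rfl]
    by_cases h : BC wantd (win d 0) = 0
    · rw [if_pos h]; simp [h]
    · rw [if_neg h]; simp [h]
  | succ k ih =>
    have hk' : k + 10 ≤ d.length := by omega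
    obtain ⟨ihs, iha⟩ := ih hk'
    have hrange : PySem.List.pyRange 1 (((k+1 : Nat) : Int) + 1) 1 =
        PySem.List.pyRange 1 ((k : Int) + 1) 1 ++ [(k : Int) + 1] := by
      have := PySem.List.pyRange_one_succ_right (a := 1) (b := (k : Int) + 1) (by omega)
      push_cast
      push_cast at this
      exact this
    have hstep : bFold wantd d (k+1) =
        (fun (s : (PySem.Dict String Int × Int) × Int) i =>
          let st1 := bRemove wantd s.1.1 s.1.2 ((PySem.List.pyGet? d (i - 1)).getD "")
          let st2 := bAdd wantd st1.1 st1.2 ((PySem.List.pyGet? d (i + 9)).getD "")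
          (st2, if st2.2 = 0 then s.2 + 1 else s.2)) (bFold wantd d k) ((k : Int) + 1) := by
      unfold bFold
      rw [hrange, List.foldl_append, List.foldl_cons, List.foldl_nil]
    have hgk : ((PySem.List.pyGet? d ((k : Int) + 1 - 1)).getD "") = d[k]'(by omega) := by
      have : (k : Int) + 1 - 1 = ((k : Nat) : Int) := by omega
      rw [this, PySem.List.pyGet?_natCast, List.getElem?_eq_getElem (by omega : k < d.length)]
      rfl
    have hgk10 : ((PySem.List.pyGet? d ((k : Int) + 1 + 9)).getD "") = d[k+10]'(by omega) := by
      have : (k : Int) + 1 + 9 = ((k + 10 : Nat) : Int) := by omega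
      rw [this, PySem.List.pyGet?_natCast,
        List.getElem?_eq_getElem (by omega : k + 10 < d.length)]
      rfl
    have hmem : d[k]'(by omega) ∈ win d k := by
      rw [win_head d k (by omega)]
      exact List.mem_cons_self
    have hrem := SInv_remove wantd _ _ _ _ ihs hmem
    have herase : (win d k).erase (d[k]'(by omega)) = (d.drop (k+1)).take 9 := by
      rw [win_head d k (by omega)]
      simp [List.erase_cons_head]
    rw [herase] at hrem
    have hadd := SInv_add wantd _ _ _ (d[k+10]'(by omega)) hrem
    rw [← win_succ d k (by omega)] at hadd
    rw [hstep]
    simp only [hgk, hgk10]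
    refine ⟨hadd, ?_⟩
    have hsplit : List.range (k+1+1) = List.range (k+1) ++ [k+1] := List.range_succ
    rw [hsplit, List.countP_append, iha]
    have hbc : (bAdd wantd (bRemove wantd (bFold wantd d k).1.1 (bFold wantd d k).1.2
        (d[k]'(by omega))).1 (bRemove wantd (bFold wantd d k).1.1 (bFold wantd d k).1.2
        (d[k]'(by omega))).2 (d[k+10]'(by omega))).2 = BC wantd (win d (k+1)) := hadd.2
    rw [hbc]
    by_cases h : BC wantd (win d (k+1)) = 0 <;> simp [h]

theorem win_length (d : List String) (j : Nat) (h : j + 10 ≤ d.length) :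
    (win d j).length = 10 := by
  unfold win
  simp
  omega

theorem A_eq_count (wantd : PySem.Dict String Int) (d : List String) :
    (PySem.List.pyRange 0 ((d.length : Int) - 10 + 1) 1).foldl (fun daycount i =>
      if tendaysGo wantd (PySem.List.slice d (some i) (some (i + 10))) 0
      then daycount + 1 else daycount) 0
    = ((List.range (((d.length : Int) - 10 + 1).toNat)).countP
        (fun j => decide (BC wantd (win d j) = 0)) : Int) := by
  rw [PySem.List.pyRange_one, List.foldl_map]
  rw [PySem.List.foldl_ite_add_one]
  rw [zero_add]
  have hb : ((d.length : Int) - 10 + 1 - 0).toNat = ((d.length : Int) - 10 + 1).toNat := by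
    norm_num
  rw [hb]
  congr 1
  apply List.countP_congr
  intro j hj
  have hjm : j < ((d.length : Int) - 10 + 1).toNat := List.mem_range.mp hj
  have hjlen : j + 10 ≤ d.length := by omega
  have h1 : (0 : Int) + (j : Nat) = ((j : Nat) : Int) := by omega
  have h2 : ((j : Nat) : Int) + 10 = ((j + 10 : Nat) : Int) := by omega
  rw [h1, h2, PySem.List.slice_natCast]
  have h3 : j + 10 - j = 10 := by omega
  rw [h3]
  have hwl : ((d.drop j).take 10).length = 10 := win_length d j hjlen
  rw [tendaysGo_eq_tdList 10 0 _ _ (by omega) hwl, List.drop_zero]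
  simp only [decide_eq_true_eq]
  rw [tdList_eq_true_iff, BC_zero_iff]
  exact Iff.rfl

theorem solution_spec : Claim_equal_solution := by
  intro want number discount _ hpre
  unfold Spec_solution
  simp only [solution, solution_alt]
  set wantd := (List.range want.length).foldl (fun d (i : Nat) =>
      match PySem.List.pyGet? want (i : Int), PySem.List.pyGet? number (i : Int) with
      | some k, some v => d.insert k v
      | _, _ => d) PySem.Dict.empty with hwantd
  have hdict : (List.range want.length).foldl (fun d (i : Nat) =>
      match PySem.List.pyGet? want (i : Int) with
      | none => d
      | some k =>
        match PySem.List.pyGet? number (i : Int) with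
        | none => d
        | some v => d.insert k v) PySem.Dict.empty = wantd := by
    rw [hwantd]
    have hfe : (fun (d : PySem.Dict String Int) (i : Nat) =>
        match PySem.List.pyGet? want (i : Int) with
        | none => d
        | some k =>
          match PySem.List.pyGet? number (i : Int) with
          | none => d
          | some v => d.insert k v)
        = (fun (d : PySem.Dict String Int) (i : Nat) =>
        match PySem.List.pyGet? want (i : Int), PySem.List.pyGet? number (i : Int) with
        | some k, some v => d.insert k v
        | _, _ => d) := by
      funext d i
      cases PySem.List.pyGet? want (i : Int) <;> cases PySem.List.pyGet? number (i : Int) <;> rfl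
    rw [hfe]
  rw [hdict]
  rw [A_eq_count]
  by_cases hlen : discount.length < 10
  · rw [if_pos hlen]
    have h0 : ((discount.length : Int) - 10 + 1).toNat = 0 := by omega
    rw [h0]
    simp
  · rw [if_neg hlen]
    have hm : ((discount.length : Int) - 10 + 1).toNat = (discount.length - 10) + 1 := by omega
    have hb9 : (discount.length : Int) - 9 = ((discount.length - 10 : Nat) : Int) + 1 := by omega
    rw [hm, hb9]
    rw [← (bFold_inv wantd discount (discount.length - 10) (by omega)).2]
    rfl
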